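-- pv_equiv track=rewrite | github.com/kh277/BOJ | 백준/Gold/2212. 센서/센서.py | solve
-- ===== SOURCE A (Python) =====
-- def solve(N, K, num):
--     num.sort()
--
--     gap = []
--     for i in range(1, N):
--         gap.append(num[i] - num[i-1])
--     gap.sort()
--
--     result = 0
--     for i in range(N-K):
--         result += gap[i]
--
--     return result
-- ===== SOURCE B (Python) =====
-- def _sum_smallest(xs, m):
--     # quickselect-style: sum of the m smallest elements of xs, without sorting
--     if m <= 0:
--         return 0
--     if m >= len(xs):
--         return sum(xs)
--     p = xs[0]
--     less = [x for x in xs if x < p]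
--     greater = [x for x in xs if x > p]
--     cnt = len(xs) - len(less) - len(greater)
--     if m <= len(less):
--         return _sum_smallest(less, m)
--     if m <= len(less) + cnt:
--         return sum(less) + p * (m - len(less))
--     return sum(less) + p * cnt + _sum_smallest(greater, m - len(less) - cnt)
--
-- def solve(N, K, num):
--     num.sort()
--     gap = [num[i] - num[i - 1] for i in range(1, N)]
--     return _sum_smallest(gap, N - K)
-- ===== Notes on version B (the rewrite author's own statement) =====
-- stated objective: alternative
-- what changed: B never sorts the gap list: after building the consecutive gaps it sums the N-K smallest by a quickselect-style recursive three-way partition (less/equal/greater than a pivot), recursing only into the side that contains the selection boundary, instead of A's sort-the-gaps-then-sum-a-prefix loop.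
import Mathlib
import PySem

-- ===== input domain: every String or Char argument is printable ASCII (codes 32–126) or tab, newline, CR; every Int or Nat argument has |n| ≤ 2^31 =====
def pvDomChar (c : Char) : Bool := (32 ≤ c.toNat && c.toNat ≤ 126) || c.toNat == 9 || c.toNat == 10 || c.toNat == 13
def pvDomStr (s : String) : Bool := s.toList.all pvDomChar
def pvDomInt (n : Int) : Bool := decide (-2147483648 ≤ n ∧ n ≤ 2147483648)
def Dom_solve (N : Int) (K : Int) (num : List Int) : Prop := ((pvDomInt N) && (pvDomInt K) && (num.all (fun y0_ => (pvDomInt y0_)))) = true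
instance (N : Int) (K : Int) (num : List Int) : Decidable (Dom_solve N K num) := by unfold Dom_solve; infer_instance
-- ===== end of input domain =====

-- B replaces A's sort-the-gaps-and-sum-a-prefix with a quickselect-style three-way
-- partition that sums the N-K smallest gaps without ever sorting the gap list;
-- equivalence is about the RETURN value only (both Pythons sort `num` in place).

-- ===== PORT A =====
-- pyGetD with default 0: the Python raises IndexError exactly where the index is out of
-- range, and those inputs are excluded by Pre_solve.
def solve (N : Int) (K : Int) (num : List Int) : Int :=
  let s := PySem.List.sorted num (fun x => x) false
  let gap := (PySem.List.pyRange 1 N 1).foldl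
      (fun g i => g ++ [PySem.List.pyGetD s i 0 - PySem.List.pyGetD s (i - 1) 0]) []
  let gs := PySem.List.sorted gap (fun x => x) false
  (PySem.List.pyRange 0 (N - K) 1).foldl (fun r i => r + PySem.List.pyGetD gs i 0) 0

-- ===== PORT B =====
-- termination helper for sumSmallest: a filter missing one element of the list is shorter
theorem filter_lt_length {α : Type} (p : α → Bool) (l : List α) (x : α)
    (hx : x ∈ l) (hp : p x = false) : (l.filter p).length < l.length := by
  calc (l.filter p).length < (l.filter p).length + (l.filter (fun y => ! p y)).length := by
        have hm : x ∈ l.filter (fun y => ! p y) := List.mem_filter.mpr ⟨hx, by simp [hp]⟩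
        have := List.length_pos_of_mem hm
        omega
    _ = l.length := by rw [← List.length_append]; exact (List.filter_append_perm p l).length_eq

theorem head_mem_of_long (xs : List Int) (h : 0 < xs.length) :
    PySem.List.pyGetD xs 0 0 ∈ xs := by
  cases xs with
  | nil => simp at h
  | cons a l => simp [PySem.List.pyGetD, PySem.List.pyGet?, PySem.List.pyIdx?]

-- _sum_smallest from Source B: sum of the m smallest elements, by three-way partition
def sumSmallest (xs : List Int) (m : Int) : Int :=
  if m ≤ 0 then 0
  else if _h2 : (xs.length : Int) ≤ m then xs.sum
  else
    let p := PySem.List.pyGetD xs 0 0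
    let less := xs.filter (fun x => x < p)
    let greater := xs.filter (fun x => p < x)
    let cnt : Int := (xs.length : Int) - less.length - greater.length
    if m ≤ (less.length : Int) then sumSmallest less m
    else if m ≤ (less.length : Int) + cnt then less.sum + p * (m - less.length)
    else less.sum + p * cnt + sumSmallest greater (m - less.length - cnt)
termination_by xs.length
decreasing_by
  all_goals
    have hpm : PySem.List.pyGetD xs 0 0 ∈ xs := head_mem_of_long xs (by omega)
    simp only [List.length_unattach]
    rw [← List.length_attach (l := xs)]
    exact filter_lt_length _ xs.attach ⟨_, hpm⟩ (List.mem_attach _ _) (by simp)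

def solve_alt (N : Int) (K : Int) (num : List Int) : Int :=
  let s := PySem.List.sorted num (fun x => x) false
  let gap := (PySem.List.pyRange 1 N 1).map
      (fun i => PySem.List.pyGetD s i 0 - PySem.List.pyGetD s (i - 1) 0)
  sumSmallest gap (N - K)

-- ===== PRECONDITION & SPEC =====
-- Exactly the inputs on which the Python A returns (no IndexError): every index of both
-- of A's loops is in range.
def Pre_solve (N : Int) (K : Int) (num : List Int) : Prop :=
  (2 ≤ N → N ≤ (num.length : Int)) ∧ N - K ≤ max (N - 1) 0
instance (N : Int) (K : Int) (num : List Int) : Decidable (Pre_solve N K num) := by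
  unfold Pre_solve; infer_instance
def pvWitness_solve : Int × Int × List Int := (3, 2, [1, 5, 2])

def Spec_solve (N : Int) (K : Int) (num : List Int) (out : Int) : Prop := out = solve_alt N K num
instance (N : Int) (K : Int) (num : List Int) (out : Int) : Decidable (Spec_solve N K num out) := by unfold Spec_solve; infer_instance

-- ===== CLAIM (what is proved, stated in full; the proofs are below) =====
def Claim_equal_solve : Prop := ∀ (N : Int) (K : Int) (num : List Int), Dom_solve N K num → Pre_solve N K num → Spec_solve N K num (solve N K num)

-- ===== LEMMAS AND PROOFS =====

-- A's second loop sums the first t entries of the ascending-sorted gap list.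
theorem foldl_sum_getD (xs : List Int) (t : Nat) (h : t ≤ xs.length) :
    (PySem.List.pyRange 0 (t : Int) 1).foldl (fun r i => r + PySem.List.pyGetD xs i 0) 0
      = (xs.take t).sum := by
  induction t with
  | zero => simp [PySem.List.pyRange_one_eq_nil]
  | succ t ih =>
    have hc : ((t + 1 : Nat) : Int) = (t : Int) + 1 := by push_cast; ring
    rw [hc, PySem.List.pyRange_one_succ_right (by positivity), List.foldl_append,
        ih (by omega)]
    have ht : t < xs.length := by omega
    rw [List.take_add_one, List.sum_append, List.getElem?_eq_getElem ht]
    simp [PySem.List.pyGetD_natCast, List.getD_eq_getElem?_getD,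
      List.getElem?_eq_getElem ht]

-- the three-way partition around p is a permutation of the list
theorem filter_three_perm (xs : List Int) (p : Int) :
    (xs.filter (fun x => x < p) ++ xs.filter (fun x => x == p)
      ++ xs.filter (fun x => p < x)).Perm xs := by
  induction xs with
  | nil => simp
  | cons a l ih =>
    rcases lt_trichotomy a p with h | h | h
    · have e1 : (a :: l).filter (fun x => x < p) = a :: l.filter (fun x => x < p) := by
        simp [h]
      have e2 : (a :: l).filter (fun x => x == p) = l.filter (fun x => x == p) := by
        simp [List.filter_cons]; omega
      have e3 : (a :: l).filter (fun x => p < x) = l.filter (fun x => p < x) := by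
        simp [List.filter_cons]; omega
      rw [e1, e2, e3]
      exact ih.cons a
    · have e1 : (a :: l).filter (fun x => x < p) = l.filter (fun x => x < p) := by
        simp [List.filter_cons]; omega
      have e2 : (a :: l).filter (fun x => x == p) = a :: l.filter (fun x => x == p) := by
        simp [h]
      have e3 : (a :: l).filter (fun x => p < x) = l.filter (fun x => p < x) := by
        simp [List.filter_cons]; omega
      rw [e1, e2, e3]
      exact (List.perm_middle.append_right _).trans (ih.cons a)
    · have e1 : (a :: l).filter (fun x => x < p) = l.filter (fun x => x < p) := by
        simp [List.filter_cons]; omega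
      have e2 : (a :: l).filter (fun x => x == p) = l.filter (fun x => x == p) := by
        simp [List.filter_cons]; omega
      have e3 : (a :: l).filter (fun x => p < x) = a :: l.filter (fun x => p < x) := by
        simp [h]
      rw [e1, e2, e3]
      exact List.perm_middle.trans (ih.cons a)

-- ascending sort splits as (sorted less) ++ (count p copies of p) ++ (sorted greater)
theorem sorted_decomp (xs : List Int) (p : Int) :
    PySem.List.sorted xs (fun x => x) false
      = PySem.List.sorted (xs.filter (fun x => x < p)) (fun x => x) false
        ++ List.replicate (xs.count p) p
        ++ PySem.List.sorted (xs.filter (fun x => p < x)) (fun x => x) false := by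
  apply PySem.List.eq_of_perm_of_pairwise_le
  · refine (PySem.List.sorted_perm xs _ false).trans ?_
    refine ((filter_three_perm xs p).symm).trans ?_
    rw [List.filter_beq]
    exact ((PySem.List.sorted_perm (xs.filter (fun x => x < p)) (fun x : Int => x) false).symm.append
        (List.Perm.refl (List.replicate (xs.count p) p))).append
      (PySem.List.sorted_perm (xs.filter (fun x => p < x)) (fun x : Int => x) false).symm
  · exact PySem.List.sorted_pairwise xs (fun x => x)
  · have hl := PySem.List.sorted_pairwise (xs.filter (fun x => x < p)) (fun x : Int => x)
    have hg := PySem.List.sorted_pairwise (xs.filter (fun x => p < x)) (fun x : Int => x)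
    have hml : ∀ x ∈ PySem.List.sorted (xs.filter (fun x => x < p)) (fun x => x) false, x < p := by
      intro x hx
      have := (PySem.List.mem_sorted _ _ _ _).1 hx
      simpa using (List.mem_filter.1 this).2
    have hmg : ∀ x ∈ PySem.List.sorted (xs.filter (fun x => p < x)) (fun x => x) false, p < x := by
      intro x hx
      have := (PySem.List.mem_sorted _ _ _ _).1 hx
      simpa using (List.mem_filter.1 this).2
    rw [List.append_assoc]
    refine List.pairwise_append.2 ⟨hl, List.pairwise_append.2
      ⟨List.pairwise_replicate.2 (Or.inr le_rfl), hg, ?_⟩, ?_⟩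
    · intro a ha b hb
      have hap : a = p := List.eq_of_mem_replicate ha
      exact hap ▸ (hmg b hb).le
    · intro a ha b hb
      rcases List.mem_append.1 hb with hb | hb
      · exact (hml a ha).le.trans (List.eq_of_mem_replicate hb ▸ le_rfl)
      · exact ((hml a ha).trans (hmg b hb)).le

-- sumSmallest computes the sum of the first m entries of the ascending sort
theorem sumSmallest_eq_aux : ∀ (n : Nat) (xs : List Int), xs.length ≤ n → ∀ m : Int,
    sumSmallest xs m = ((PySem.List.sorted xs (fun x => x) false).take m.toNat).sum := by
  intro n
  induction n with
  | zero =>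
    intro xs hn m
    have hx : xs = [] := List.eq_nil_of_length_eq_zero (by omega)
    subst hx
    have hs : PySem.List.sorted ([] : List Int) (fun x => x) false = [] := rfl
    rw [sumSmallest]
    by_cases hm : m ≤ 0
    · simp [hm, hs]
    · rw [if_neg hm, dif_pos (by simp; omega)]
      simp [hs]
  | succ n ih =>
    intro xs hn m
    rw [sumSmallest]
    by_cases hm : m ≤ 0
    · simp [hm, Int.toNat_of_nonpos hm]
    · rw [if_neg hm]
      by_cases hlen : (xs.length : Int) ≤ m
      · rw [dif_pos hlen]
        have h1 : (PySem.List.sorted xs (fun x => x) false).length ≤ m.toNat := by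
          rw [PySem.List.length_sorted]; omega
        rw [List.take_of_length_le h1]
        exact ((PySem.List.sorted_perm xs (fun x => x) false).sum_eq).symm
      · rw [dif_neg hlen]
        set p := PySem.List.pyGetD xs 0 0 with hp
        set less := xs.filter (fun x => x < p) with hless
        set greater := xs.filter (fun x => p < x) with hgreater
        have hpm : p ∈ xs := head_mem_of_long xs (by omega)
        have hll : less.length < xs.length :=
          filter_lt_length _ xs p hpm (by simp)
        have hgl : greater.length < xs.length :=
          filter_lt_length _ xs p hpm (by simp)
        have hpart : less.length + xs.count p + greater.length = xs.length := by
          have := (filter_three_perm xs p).length_eq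
          simp only [List.filter_beq, List.length_append, List.length_replicate,
            ← hless, ← hgreater] at this
          omega
        set c := xs.count p with hc
        have hdec := sorted_decomp xs p
        rw [← hless, ← hgreater, ← hc] at hdec
        set Sl := PySem.List.sorted less (fun x => x) false with hSl
        set Sg := PySem.List.sorted greater (fun x => x) false with hSg
        have hSllen : Sl.length = less.length := PySem.List.length_sorted ..
        have hSlsum : Sl.sum = less.sum := (PySem.List.sorted_perm less _ false).sum_eq
        have hmt : ((m.toNat : Int)) = m := Int.toNat_of_nonneg (by omega)
        by_cases h3 : m ≤ (less.length : Int)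
        · rw [if_pos h3, hdec]
          rw [List.append_assoc, List.take_append_of_le_length (by omega)]
          exact ih less (by omega) m
        · rw [if_neg h3]
          have hcnt : (xs.length : Int) - (less.length : Int) - (greater.length : Int)
              = (c : Int) := by omega
          rw [hcnt]
          by_cases h4 : m ≤ (less.length : Int) + (c : Int)
          · rw [if_pos h4, hdec, List.append_assoc, List.take_append,
              List.take_of_length_le (by omega), List.take_append, List.take_replicate]
            have h5 : min (m.toNat - Sl.length) c = m.toNat - Sl.length := by omega
            have h6 : m.toNat - Sl.length - (List.replicate c p).length = 0 := by
              simp [List.length_replicate]; omega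
            rw [h5, h6, List.take_zero, List.append_nil, List.sum_append, hSlsum,
              List.sum_replicate, nsmul_eq_mul]
            have : ((m.toNat - Sl.length : Nat) : Int) = m - (less.length : Int) := by
              omega
            rw [this]; ring
          · rw [if_neg h4, hdec, List.append_assoc, List.take_append,
              List.take_of_length_le (by omega), List.take_append,
              List.take_of_length_le (by simp [List.length_replicate]; omega)]
            rw [List.sum_append, List.sum_append, hSlsum, List.sum_replicate, nsmul_eq_mul]
            have h7 : m.toNat - Sl.length - (List.replicate c p).length
                = (m - (less.length : Int) - (c : Int)).toNat := by
              simp [List.length_replicate]; omega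
            rw [h7, ← ih greater (by omega) (m - (less.length : Int) - (c : Int))]
            ring

-- ===== VERDICT (by name: the statement is the Claim_ definition above) =====
theorem solve_spec : Claim_equal_solve := by
  intro N K num _ hpre
  obtain ⟨h1, h2⟩ := hpre
  unfold Spec_solve
  have hA : solve N K num =
      (PySem.List.pyRange 0 (N - K) 1).foldl
        (fun r i => r + PySem.List.pyGetD
          (PySem.List.sorted
            ((PySem.List.pyRange 1 N 1).foldl
              (fun g i => g ++ [PySem.List.pyGetD (PySem.List.sorted num (fun x => x) false) i 0
                - PySem.List.pyGetD (PySem.List.sorted num (fun x => x) false) (i - 1) 0]) [])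
            (fun x => x) false) i 0) 0 := rfl
  have hB : solve_alt N K num =
      sumSmallest
        ((PySem.List.pyRange 1 N 1).map
          (fun i => PySem.List.pyGetD (PySem.List.sorted num (fun x => x) false) i 0
            - PySem.List.pyGetD (PySem.List.sorted num (fun x => x) false) (i - 1) 0))
        (N - K) := rfl
  rw [hA, hB, PySem.List.foldl_append_singleton_eq_map, List.nil_append]
  set L := (PySem.List.pyRange 1 N 1).map
      (fun i => PySem.List.pyGetD (PySem.List.sorted num (fun x => x) false) i 0
        - PySem.List.pyGetD (PySem.List.sorted num (fun x => x) false) (i - 1) 0) with hL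
  have hlenL : L.length = (N - 1).toNat := by
    simp [hL, PySem.List.length_pyRange_one]
  rw [sumSmallest_eq_aux L.length L le_rfl (N - K)]
  have hrange : PySem.List.pyRange 0 (N - K) 1
      = PySem.List.pyRange 0 (((N - K).toNat : Int)) 1 := by
    by_cases h : N - K ≤ 0
    · rw [PySem.List.pyRange_one_eq_nil h, PySem.List.pyRange_one_eq_nil (by omega)]
    · congr 1; omega
  rw [hrange, foldl_sum_getD _ (N - K).toNat (by rw [PySem.List.length_sorted]; omega)]
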